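-- pv_equiv track=rewrite | github.com/R-Wright-1/Plastisphere-MetaAnalysis | python_analyses_old/all_functions.py | get_venn_labels
-- ===== SOURCE A (Python) =====
-- from itertools import chain
--
-- def get_venn_labels(data, fill=["number"]): #calculate the number of overlapping ASVs between different sample types
--     N = len(data)
--
--     sets_data = [set(data[i]) for i in range(N)]
--     s_all = set(chain(*data))
--
--     set_collections = {}
--     for n in range(1, 2**N):
--         key = bin(n).split('0b')[-1].zfill(N)
--         value = s_all
--         sets_for_intersection = [sets_data[i] for i in range(N) if  key[i] == '1']
--         sets_for_difference = [sets_data[i] for i in range(N) if  key[i] == '0']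
--         for s in sets_for_intersection:
--             value = value & s
--         for s in sets_for_difference:
--             value = value - s
--         set_collections[key] = value
--
--     labels = []
--     for k in set_collections:
--         labels.append(str(len(set_collections[k])))
--     return labels
-- ===== SOURCE B (Python) =====
-- from itertools import chain
--
-- def get_venn_labels(data, fill=["number"]):
--     # One pass over the distinct elements: tally each element's membership
--     # bitmask, then emit the tallies for masks 1 .. 2**N - 1 in order.
--     N = len(data)
--     sets_data = [set(d) for d in data]
--     counts = [0] * (2 ** N)
--     for x in set(chain(*data)):
--         mask = 0
--         for s in sets_data:
--             mask = mask * 2 + (x in s)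
--         counts[mask] += 1
--     return [str(c) for c in counts[1:]]
-- ===== Notes on version B (the rewrite author's own statement) =====
-- stated objective: alternative
-- what changed: Instead of materialising each of the 2^N-1 Venn regions by repeated set intersection/difference over the whole universe of elements, B computes each distinct element's membership bitmask once and tallies a count per mask, emitting the tallies in mask order (measured much faster on mid-size inputs, but a timing run could not confirm it at the largest size, where the 2^N-sized output dominates both).
import Mathlib
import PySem

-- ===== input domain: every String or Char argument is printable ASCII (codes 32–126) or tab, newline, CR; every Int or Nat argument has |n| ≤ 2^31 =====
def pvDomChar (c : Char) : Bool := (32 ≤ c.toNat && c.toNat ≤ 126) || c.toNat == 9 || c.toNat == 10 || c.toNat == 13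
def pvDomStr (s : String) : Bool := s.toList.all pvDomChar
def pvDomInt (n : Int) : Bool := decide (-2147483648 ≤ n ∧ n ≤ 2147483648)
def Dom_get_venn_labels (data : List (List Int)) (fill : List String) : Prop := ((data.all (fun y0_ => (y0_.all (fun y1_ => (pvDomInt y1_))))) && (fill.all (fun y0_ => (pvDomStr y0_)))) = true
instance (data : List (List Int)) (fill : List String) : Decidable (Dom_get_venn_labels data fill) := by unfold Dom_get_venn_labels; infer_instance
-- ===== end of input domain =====

-- B replaces A's per-region sweep (2^N-1 rounds of set intersection/difference over the
-- whole universe) by one pass that tallies each distinct element's membership bitmask.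

-- ===== PORT A =====
-- bin(n).split('0b')[-1] for n ≥ 1 (the binary digits of n, most significant first);
-- exact for every n A passes to it (the loop runs over n in range(1, 2**N), so n ≥ 1).
def pvBinDigits (n : Nat) : List Char :=
  if h : n = 0 then []
  else pvBinDigits (n / 2) ++ [if n % 2 = 1 then '1' else '0']
decreasing_by exact Nat.div_lt_self (Nat.pos_of_ne_zero h) (by norm_num)

-- s.zfill(N) for a '0'/'1' digit string (no sign handling needed on this input)
def pvZfill (N : Nat) (cs : List Char) : List Char := List.replicate (N - cs.length) '0' ++ cs

def get_venn_labels (data : List (List Int)) (fill : List String) : List String :=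
  let N := data.length
  let sets_data := data.map (fun d => PySem.Set.ofList d)
  let s_all : PySem.Set Int := PySem.Set.ofList data.flatten
  let set_collections : PySem.Dict (List Char) (PySem.Set Int) :=
    (PySem.List.pyRange 1 ((2:Int)^N) 1).foldl (fun dct n =>
      let key := pvZfill N (pvBinDigits n.toNat)
      let value := s_all
      let sets_for_intersection := ((List.range N).filter (fun i => key.getD i ' ' == '1')).map (fun i => sets_data.getD i [])
      let sets_for_difference := ((List.range N).filter (fun i => key.getD i ' ' == '0')).map (fun i => sets_data.getD i [])
      let value := sets_for_intersection.foldl (fun v s => PySem.Set.inter v s) value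
      let value := sets_for_difference.foldl (fun v s => PySem.Set.diff v s) value
      dct.insert key value) PySem.Dict.empty
  set_collections.keys.map (fun k => PySem.Int.toStr (PySem.Set.len (set_collections.getD k [])))

-- ===== PORT B =====
def get_venn_labels_alt
 (data : List (List Int)) (fill : List String) : List String :=
  let N := data.length
  let sets_data := data.map (fun d => PySem.Set.ofList d)
  let counts : List Int :=
    (PySem.Set.ofList data.flatten).foldl (fun c x =>
      let mask := sets_data.foldl (fun m s => m * 2 + (if PySem.Set.contains s x then 1 else 0)) (0 : Int)
      PySem.List.pySetD c mask (PySem.List.pyGetD c mask 0 + 1))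
      (List.replicate (2^N) (0 : Int))
  (counts.drop 1).map PySem.Int.toStr


-- ===== PRECONDITION & SPEC =====
def Spec_get_venn_labels (data : List (List Int)) (fill : List String) (out : List String) : Prop := out = get_venn_labels_alt data fill
instance (data : List (List Int)) (fill : List String) (out : List String) : Decidable (Spec_get_venn_labels data fill out) := by unfold Spec_get_venn_labels; infer_instance

-- ===== CLAIM (what is proved, stated in full; the proofs are below) =====
def Claim_equal_get_venn_labels : Prop := ∀ (data : List (List Int)) (fill : List String), Dom_get_venn_labels data fill → Spec_get_venn_labels data fill (get_venn_labels data fill)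

-- ===== LEMMAS AND PROOFS =====

def pvValC (cs : List Char) : Int := cs.foldl (fun m c => m * 2 + (if c = '1' then 1 else 0)) 0

lemma pvValC_shift (cs : List Char) (a : Int) :
    cs.foldl (fun m c => m * 2 + (if c = '1' then 1 else 0)) a = a * 2 ^ cs.length + pvValC cs := by
  induction cs generalizing a with
  | nil => simp [pvValC]
  | cons c cs ih =>
    simp only [List.foldl_cons, List.length_cons, pvValC]
    rw [ih, ih (0 * 2 + _)]
    ring


lemma pvValC_cons (c : Char) (cs : List Char) :
    pvValC (c :: cs) = (if c = '1' then 1 else 0) * 2 ^ cs.length + pvValC cs := by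
  have h0 : pvValC (c :: cs) = cs.foldl (fun m c => m * 2 + (if c = '1' then 1 else 0)) ((0:Int) * 2 + (if c = '1' then 1 else 0)) := rfl
  rw [h0, pvValC_shift]; ring

lemma pvValC_bounds (cs : List Char) (h : ∀ c ∈ cs, c = '0' ∨ c = '1') :
    0 ≤ pvValC cs ∧ pvValC cs < 2 ^ cs.length := by
  induction cs with
  | nil => simp [pvValC]
  | cons c cs ih =>
    have hb := ih (fun x hx => h x (List.mem_cons_of_mem _ hx))
    rw [pvValC_cons]
    have h2 : (0:Int) < 2 ^ cs.length := by positivity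
    constructor
    · split_ifs <;> omega
    · simp only [List.length_cons, pow_succ]
      split_ifs <;> omega

lemma pvValC_inj (cs ds : List Char) (hlen : cs.length = ds.length)
    (hc : ∀ c ∈ cs, c = '0' ∨ c = '1') (hd : ∀ c ∈ ds, c = '0' ∨ c = '1')
    (hv : pvValC cs = pvValC ds) : cs = ds := by
  induction cs generalizing ds with
  | nil => cases ds with
    | nil => rfl
    | cons d ds => simp at hlen
  | cons c cs ih =>
    cases ds with
    | nil => simp at hlen
    | cons d ds =>
      simp only [List.length_cons, Nat.add_right_cancel_iff] at hlen
      rw [pvValC_cons, pvValC_cons, ← hlen] at hv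
      have bc := pvValC_bounds cs (fun x hx => hc x (List.mem_cons_of_mem _ hx))
      have bd := pvValC_bounds ds (fun x hx => hd x (List.mem_cons_of_mem _ hx))
      rw [← hlen] at bd
      have hcd : c = d := by
        rcases hc c (List.mem_cons_self) with h1 | h1 <;>
          rcases hd d (List.mem_cons_self) with h2 | h2 <;>
            subst h1 <;> subst h2 <;> first | rfl | (exfalso; simp at hv; omega)
      subst hcd
      have : pvValC cs = pvValC ds := by
        split_ifs at hv <;> omega
      rw [ih ds hlen (fun x hx => hc x (List.mem_cons_of_mem _ hx)) (fun x hx => hd x (List.mem_cons_of_mem _ hx)) this]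

lemma pvValC_append_singleton (cs : List Char) (c : Char) :
    pvValC (cs ++ [c]) = pvValC cs * 2 + (if c = '1' then 1 else 0) := by
  simp [pvValC, List.foldl_append]

lemma pvBinDigits_chars (n : Nat) : ∀ c ∈ pvBinDigits n, c = '0' ∨ c = '1' := by
  induction n using Nat.strong_induction_on with
  | _ n ih =>
    rw [pvBinDigits]
    split_ifs with h hm <;> intro c hc
    · simp at hc
    all_goals
      rcases List.mem_append.1 hc with h1 | h1
      · exact ih (n / 2) (Nat.div_lt_self (Nat.pos_of_ne_zero h) (by norm_num)) c h1
      · simp at h1; subst h1; simp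

lemma pvBinDigits_val (n : Nat) : pvValC (pvBinDigits n) = n := by
  induction n using Nat.strong_induction_on with
  | _ n ih =>
    rw [pvBinDigits]
    split_ifs with h hm
    · simp [pvValC, h]
    · rw [pvValC_append_singleton, ih (n / 2) (Nat.div_lt_self (Nat.pos_of_ne_zero h) (by norm_num)),
        if_pos rfl]
      omega
    · rw [pvValC_append_singleton, ih (n / 2) (Nat.div_lt_self (Nat.pos_of_ne_zero h) (by norm_num)),
        if_neg (by decide)]
      omega

lemma pvBinDigits_len (n N : Nat) (h : n < 2 ^ N) : (pvBinDigits n).length ≤ N := by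
  induction n using Nat.strong_induction_on generalizing N with
  | _ n ih =>
    rw [pvBinDigits]
    split_ifs with h0 hm
    · simp
    all_goals
      cases N with
      | zero => simp at h; omega
      | succ N =>
        have hd : n / 2 < 2 ^ N := by
          have : 2 ^ (N + 1) = 2 ^ N * 2 := by ring
          omega
        have := ih (n / 2) (Nat.div_lt_self (Nat.pos_of_ne_zero h0) (by norm_num)) N hd
        simp only [List.length_append, List.length_singleton]
        omega

lemma pvZfill_chars (N : Nat) (cs : List Char) (h : ∀ c ∈ cs, c = '0' ∨ c = '1') :
    ∀ c ∈ pvZfill N cs, c = '0' ∨ c = '1' := by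
  intro c hc
  rcases List.mem_append.1 hc with h1 | h1
  · left; exact (List.eq_of_mem_replicate h1)
  · exact h c h1

lemma pvValC_replicate_zero_append (k : Nat) (cs : List Char) :
    pvValC (List.replicate k '0' ++ cs) = pvValC cs := by
  induction k with
  | zero => simp
  | succ k ih => rw [List.replicate_succ, List.cons_append, pvValC_cons, ih]; simp [pvValC]

lemma pvZfill_val (N : Nat) (cs : List Char) : pvValC (pvZfill N cs) = pvValC cs :=
  pvValC_replicate_zero_append _ _

lemma pvZfill_len (N : Nat) (cs : List Char) (h : cs.length ≤ N) : (pvZfill N cs).length = N := by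
  simp [pvZfill]; omega

def pvBits (sets : List (PySem.Set Int)) (x : Int) : List Char :=
  sets.map (fun s => if PySem.Set.contains s x then '1' else '0')

lemma pvMask_eq_valC (sets : List (PySem.Set Int)) (x : Int) :
    sets.foldl (fun m s => m * 2 + (if PySem.Set.contains s x then 1 else 0)) (0 : Int)
      = pvValC (pvBits sets x) := by
  rw [pvBits, pvValC, List.foldl_map]
  congr 1
  funext m s
  by_cases h : PySem.Set.contains s x <;> simp [h]

lemma pvBits_chars (sets : List (PySem.Set Int)) (x : Int) : ∀ c ∈ pvBits sets x, c = '0' ∨ c = '1' := by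
  intro c hc
  rw [pvBits] at hc
  rcases List.mem_map.1 hc with ⟨s, _, rfl⟩
  by_cases h : PySem.Set.contains s x
  · right; rw [if_pos h]
  · left; rw [if_neg h]

lemma foldl_inter_filter (L : List (PySem.Set Int)) (u : List Int) :
    L.foldl (fun v s => PySem.Set.inter v s) u = u.filter (fun x => L.all (fun s => PySem.Set.contains s x)) := by
  induction L generalizing u with
  | nil => simp
  | cons t L ih =>
    rw [List.foldl_cons, ih]
    show (PySem.Set.inter u t).filter _ = _
    rw [PySem.Set.inter, List.filter_filter]
    apply List.filter_congr
    intro x _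
    simp [Bool.and_comm]

lemma foldl_diff_filter (L : List (PySem.Set Int)) (u : List Int) :
    L.foldl (fun v s => PySem.Set.diff v s) u = u.filter (fun x => L.all (fun s => !PySem.Set.contains s x)) := by
  induction L generalizing u with
  | nil => simp
  | cons t L ih =>
    rw [List.foldl_cons, ih]
    show (PySem.Set.diff u t).filter _ = _
    rw [PySem.Set.diff, List.filter_filter]
    apply List.filter_congr
    intro x _
    simp [Bool.and_comm]

lemma pvGetD_set_eq (l : List Int) (i : Nat) (v : Int) (h : i < l.length) : (l.set i v).getD i 0 = v := by
  rw [List.getD_eq_getElem _ _ (by simpa using h)]; simp [List.getElem_set_self]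

lemma pvGetD_set_ne (l : List Int) (i j : Nat) (v : Int) (h : j ≠ i) : (l.set i v).getD j 0 = l.getD j 0 := by
  by_cases hj : j < l.length
  · rw [List.getD_eq_getElem _ _ (by simpa using hj), List.getD_eq_getElem _ _ hj, List.getElem_set_ne (by omega)]
  · rw [List.getD_eq_default _ _ (by simpa using hj), List.getD_eq_default _ _ (by omega)]

-- B's tally loop: length is preserved and each cell counts its mask
lemma counts_loop (f : Int → Int) (u : List Int) (c : List Int)
    (hf : ∀ x, 0 ≤ f x ∧ (f x).toNat < c.length) :
    (u.foldl (fun c x => PySem.List.pySetD c (f x) (PySem.List.pyGetD c (f x) 0 + 1)) c).length = c.length ∧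
    ∀ m : Nat, m < c.length →
      (u.foldl (fun c x => PySem.List.pySetD c (f x) (PySem.List.pyGetD c (f x) 0 + 1)) c).getD m 0
        = c.getD m 0 + (u.countP (fun x => (f x).toNat = m) : Int) := by
  induction u generalizing c with
  | nil => simp
  | cons x u ih =>
    have hx := hf x
    have hset : PySem.List.pySetD c (f x) (PySem.List.pyGetD c (f x) 0 + 1)
        = c.set (f x).toNat (PySem.List.pyGetD c (f x) 0 + 1) :=
      PySem.List.pySetD_of_nonneg _ _ hx.1
    have hlen : (c.set (f x).toNat (PySem.List.pyGetD c (f x) 0 + 1)).length = c.length := by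
      simp
    obtain ⟨ihlen, ihval⟩ := ih (c.set (f x).toNat (PySem.List.pyGetD c (f x) 0 + 1))
      (by rw [hlen]; exact hf)
    constructor
    · rw [List.foldl_cons, hset, ihlen, hlen]
    · intro m hm
      rw [List.foldl_cons, hset, ihval m (by omega), List.countP_cons]
      have hget : PySem.List.pyGetD c (f x) 0 = c.getD (f x).toNat 0 := by
        rw [PySem.List.pyGetD_of_nonneg c 0 hx.1]
      by_cases hq : (f x).toNat = m
      · subst hq
        rw [pvGetD_set_eq _ _ _ hx.2, hget]
        simp
        omega
      · rw [pvGetD_set_ne _ _ _ _ (fun hh => hq hh.symm)]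
        simp [hq]
lemma pyRange_one_pow (K : Nat) :
    PySem.List.pyRange 1 (K : Int) 1 = (List.range (K - 1)).map (fun k => Int.ofNat (1 + k)) := by
  rw [PySem.List.pyRange]
  simp only [if_neg (by norm_num : ¬(1:Int)=0), if_pos (by norm_num : (0:Int)<1)]
  split_ifs with h
  · have h1 : ((K:Int) - 1 + 1 - 1) / 1 = (K:Int) - 1 := by omega
    have hk : ((K:Int) - 1).toNat = K - 1 := by omega
    rw [h1, hk]
    apply List.map_congr_left
    intro a _
    simp [Int.ofNat_eq_natCast]
  · have : K - 1 = 0 := by omega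
    simp [this]

lemma bits_eq_key_iff (sets : List (PySem.Set Int)) (x : Int) (key : List Char)
    (hlen : key.length = sets.length) (hkc : ∀ c ∈ key, c = '0' ∨ c = '1') :
    pvBits sets x = key ↔
      (∀ i, i < sets.length →
        ((key.getD i ' ' = '1' → PySem.Set.contains (sets.getD i []) x = true)
          ∧ (key.getD i ' ' = '0' → PySem.Set.contains (sets.getD i []) x = false))) := by
  have hblen : (pvBits sets x).length = sets.length := by simp [pvBits]
  constructor
  · intro h i hi
    rw [← h] at hlen ⊢
    rw [List.getD_eq_getElem _ _ (by omega)]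
    have : (pvBits sets x)[i]'(by omega) = if PySem.Set.contains (sets.getD i []) x then '1' else '0' := by
      simp only [pvBits, List.getElem_map]
      congr 1
      rw [List.getD_eq_getElem _ _ hi]
    rw [this]
    by_cases hc : PySem.Set.contains (sets.getD i []) x <;> simp [hc]
  · intro h
    apply List.ext_getElem (by omega)
    intro i hi1 hi2
    have hib : i < sets.length := by omega
    have hbi : (pvBits sets x)[i]'hi1 = if PySem.Set.contains (sets.getD i []) x then '1' else '0' := by
      simp only [pvBits, List.getElem_map]
      congr 1
      rw [List.getD_eq_getElem _ _ hib]
    have hkey : key[i]'hi2 = key.getD i ' ' := (List.getD_eq_getElem _ _ hi2).symm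
    rcases hkc (key[i]'hi2) (List.getElem_mem hi2) with h0 | h1
    · have hcf := (h i hib).2 (by rw [← hkey]; exact h0)
      rw [hbi, h0, if_neg (by rw [hcf]; exact Bool.false_ne_true)]
    · have := (h i hib).1 (by rw [← hkey]; exact h1)
      rw [hbi, h1, if_pos this]

lemma valueA_eq_filter (sets : List (PySem.Set Int)) (u : List Int) (key : List Char)
    (hlen : key.length = sets.length) (hkc : ∀ c ∈ key, c = '0' ∨ c = '1') :
    (((List.range sets.length).filter (fun i => key.getD i ' ' == '0')).map (fun i => sets.getD i [])).foldl
        (fun v s => PySem.Set.diff v s)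
        ((((List.range sets.length).filter (fun i => key.getD i ' ' == '1')).map (fun i => sets.getD i [])).foldl
          (fun v s => PySem.Set.inter v s) u)
      = u.filter (fun x => pvBits sets x == key) := by
  rw [foldl_inter_filter, foldl_diff_filter, List.filter_filter]
  apply List.filter_congr
  intro x _
  rw [Bool.eq_iff_iff]
  simp only [Bool.and_eq_true, List.all_map, List.all_filter, List.all_eq_true, List.mem_range,
    Function.comp_apply, Bool.or_eq_true, Bool.not_eq_true', beq_iff_eq]
  rw [bits_eq_key_iff sets x key hlen hkc]
  constructor
  · rintro ⟨h0, h1⟩ i hi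
    constructor
    · intro hk
      rcases h1 i hi with hc | hc
      · exact absurd hk (by simpa using hc)
      · exact hc
    · intro hk
      rcases h0 i hi with hc | hc
      · exact absurd hk (by simpa using hc)
      · exact hc
  · intro h
    constructor
    · intro i hi
      by_cases hk : key.getD i ' ' = '0'
      · right; exact (h i hi).2 hk
      · left; simpa using hk
    · intro i hi
      by_cases hk : key.getD i ' ' = '1'
      · right; exact (h i hi).1 hk
      · left; simpa using hk

def pvMaskI (data : List (List Int)) (x : Int) : Int :=
  (data.map (fun d => PySem.Set.ofList d)).foldl (fun m s => m * 2 + (if PySem.Set.contains s x then 1 else 0)) 0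

def pvCanon (data : List (List Int)) : List String :=
  (List.range (2 ^ data.length - 1)).map (fun k =>
    PySem.Int.toStr (((PySem.Set.ofList data.flatten).countP (fun x => pvMaskI data x == ((1 + k : Nat) : Int)) : Int)))

lemma pvMaskI_bounds (data : List (List Int)) (x : Int) :
    0 ≤ pvMaskI data x ∧ (pvMaskI data x).toNat < 2 ^ data.length := by
  have h := pvValC_bounds (pvBits (data.map (fun d => PySem.Set.ofList d)) x)
    (pvBits_chars _ x)
  have hlen : (pvBits (data.map (fun d => PySem.Set.ofList d)) x).length = data.length := by
    simp [pvBits]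
  rw [pvMaskI, pvMask_eq_valC, ]
  rw [hlen] at h
  constructor
  · exact h.1
  · have h2 : (2:Int) ^ data.length = ((2 ^ data.length : Nat) : Int) := by push_cast; ring
    omega

lemma pvCnt_congr (data : List (List Int)) (u : List Int) (i : Nat) :
    u.countP (fun x => decide ((pvMaskI data x).toNat = 1 + i))
      = u.countP (fun x => pvMaskI data x == ((1 + i : Nat) : Int)) := by
  apply List.countP_congr
  intro x _
  have h0 := (pvMaskI_bounds data x).1
  by_cases hm : pvMaskI data x = ((1 + i : Nat) : Int)
  · have ht : (pvMaskI data x).toNat = 1 + i := by omega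
    simp [hm]
    omega
  · have ht : ¬ (pvMaskI data x).toNat = 1 + i := by omega
    simp [ht]
    omega

lemma B_out (data : List (List Int)) (fill : List String) :
    get_venn_labels_alt data fill = pvCanon data := by
  rw [get_venn_labels_alt]
  simp only []
  rw [show (fun (c : List Int) (x : Int) =>
        PySem.List.pySetD c ((data.map (fun d => PySem.Set.ofList d)).foldl (fun m s => m * 2 + (if PySem.Set.contains s x then 1 else 0)) (0 : Int))
          (PySem.List.pyGetD c ((data.map (fun d => PySem.Set.ofList d)).foldl (fun m s => m * 2 + (if PySem.Set.contains s x then 1 else 0)) (0 : Int)) 0 + 1))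
      = (fun (c : List Int) (x : Int) => PySem.List.pySetD c (pvMaskI data x) (PySem.List.pyGetD c (pvMaskI data x) 0 + 1)) from rfl]
  obtain ⟨hlen, hval⟩ := counts_loop (pvMaskI data) (PySem.Set.ofList data.flatten) (List.replicate (2 ^ data.length) (0:Int))
    (by intro x; have := pvMaskI_bounds data x; simpa using this)
  apply List.ext_getElem
  · simp [pvCanon, hlen]
  · intro i hi1 hi2
    have hL : (List.replicate (2 ^ data.length) (0:Int)).length = 2 ^ data.length := by simp
    have hc : (pvCanon data).length = 2 ^ data.length - 1 := by simp [pvCanon]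
    have hiK : 1 + i < 2 ^ data.length := by omega
    rw [List.getElem_map, List.getElem_drop]
    simp only [pvCanon]
    rw [List.getElem_map, List.getElem_range]
    congr 1
    have h1 := hval (1 + i) (by rw [hL]; omega)
    rw [List.getD_eq_getElem _ _ (by rw [hlen, hL]; omega),
      List.getD_eq_getElem _ _ (by rw [hL]; omega), List.getElem_replicate] at h1
    rw [h1, zero_add]
    rw [pvCnt_congr]

-- key for region n (1 ≤ n < 2^N): the zero-filled binary string
def pvKey (N : Nat) (n : Int) : List Char := pvZfill N (pvBinDigits n.toNat)

lemma pvKey_chars (N : Nat) (n : Int) : ∀ c ∈ pvKey N n, c = '0' ∨ c = '1' :=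
  pvZfill_chars _ _ (pvBinDigits_chars _)

lemma pvKey_len (N : Nat) (n : Int) (h : n.toNat < 2 ^ N) : (pvKey N n).length = N :=
  pvZfill_len _ _ (pvBinDigits_len _ _ h)

lemma pvKey_val (N : Nat) (n : Int) : pvValC (pvKey N n) = (n.toNat : Int) := by
  rw [pvKey, pvZfill_val, pvBinDigits_val]

lemma pvKey_inj (N : Nat) (n m : Int) (_hn : n.toNat < 2 ^ N) (_hm : m.toNat < 2 ^ N)
    (hnn : 0 ≤ n) (hmm : 0 ≤ m) (h : pvKey N n = pvKey N m) : n = m := by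
  have := congrArg pvValC h
  rw [pvKey_val, pvKey_val] at this
  omega

-- bits = key(n)  ↔  mask = n   (for 0 ≤ n < 2^N, N = data.length)
lemma bits_eq_key_iff_mask (data : List (List Int)) (x : Int) (n : Int)
    (hn0 : 0 ≤ n) (hn : n.toNat < 2 ^ data.length) :
    (pvBits (data.map (fun d => PySem.Set.ofList d)) x = pvKey data.length n) ↔ pvMaskI data x = n := by
  have hkl : (pvKey data.length n).length = data.length := pvKey_len _ _ hn
  have hbl : (pvBits (data.map (fun d => PySem.Set.ofList d)) x).length = data.length := by simp [pvBits]
  constructor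
  · intro h
    have := congrArg pvValC h
    rw [pvKey_val] at this
    rw [pvMaskI, pvMask_eq_valC, this]
    omega
  · intro h
    apply pvValC_inj _ _ (by rw [hkl, hbl]) (pvBits_chars _ _) (pvKey_chars _ _)
    rw [pvKey_val, ← pvMask_eq_valC]
    rw [pvMaskI] at h
    rw [h]
    omega

def pvValFn (data : List (List Int)) (n : Int) : PySem.Set Int :=
  (((List.range data.length).filter (fun i => (pvKey data.length n).getD i ' ' == '0')).map
      (fun i => (data.map (fun d => PySem.Set.ofList d)).getD i [])).foldl (fun v s => PySem.Set.diff v s)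
    ((((List.range data.length).filter (fun i => (pvKey data.length n).getD i ' ' == '1')).map
      (fun i => (data.map (fun d => PySem.Set.ofList d)).getD i [])).foldl (fun v s => PySem.Set.inter v s)
      (PySem.Set.ofList data.flatten))

lemma valueA_eq_filter' (data : List (List Int)) (n : Int)
    (hlen : (pvKey data.length n).length = data.length) :
    pvValFn data n = (PySem.Set.ofList data.flatten).filter
      (fun x => pvBits (data.map (fun d => PySem.Set.ofList d)) x == pvKey data.length n) := by
  have h := valueA_eq_filter (data.map (fun d => PySem.Set.ofList d)) (PySem.Set.ofList data.flatten)
    (pvKey data.length n) (by rw [List.length_map]; exact hlen) (pvKey_chars _ _)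
  rw [pvValFn]
  rw [List.length_map] at h
  exact h

lemma A_out (data : List (List Int)) (fill : List String) :
    get_venn_labels data fill = pvCanon data := by
  rw [get_venn_labels]
  simp only []
  have hcast : (2:Int) ^ data.length = ((2 ^ data.length : Nat) : Int) := by push_cast; ring
  rw [hcast, pyRange_one_pow]
  have hkfun : ∀ n : Int, pvZfill data.length (pvBinDigits n.toNat) = pvKey data.length n := fun _ => rfl
  -- membership facts about the loop list
  have hmem : ∀ n ∈ (List.range (2 ^ data.length - 1)).map (fun k => Int.ofNat (1 + k)),
      0 ≤ n ∧ n.toNat < 2 ^ data.length := by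
    intro n hn
    rcases List.mem_map.1 hn with ⟨k, hk, rfl⟩
    rcases List.mem_range.1 hk with _
    constructor
    · exact Int.natCast_nonneg _
    · simp only [Int.ofNat_eq_natCast, Int.toNat_natCast]
      omega
  have hnodup : (((List.range (2 ^ data.length - 1)).map (fun k => Int.ofNat (1 + k))).map
      (fun n => pvKey data.length n)).Nodup := by
    apply List.Nodup.map_on
    · intro n hn m hm h
      exact pvKey_inj data.length n m (hmem n hn).2 (hmem m hm).2 (hmem n hn).1 (hmem m hm).1 h
    · apply List.Nodup.map_on
      · intro a _ b _ h
        simp only [Int.ofNat_eq_natCast, Nat.cast_inj] at h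
        omega
      · exact List.nodup_range
  have hitems := PySem.Dict.items_foldl_insert_fresh
    (l := (List.range (2 ^ data.length - 1)).map (fun k => Int.ofNat (1 + k)))
    (k := fun n => pvKey data.length n) (v := fun n => pvValFn data n) (d := PySem.Dict.empty)
    (by intro a _; exact PySem.Dict.contains_empty _) hnodup
  set L := (List.range (2 ^ data.length - 1)).map (fun k => Int.ofNat (1 + k)) with hLdef
  show ((L.foldl (fun dct n => dct.insert (pvKey data.length n) (pvValFn data n)) PySem.Dict.empty).keys).map
      (fun k => PySem.Int.toStr (PySem.Set.len
        ((L.foldl (fun dct n => dct.insert (pvKey data.length n) (pvValFn data n)) PySem.Dict.empty).getD k [])))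
      = pvCanon data
  set D := L.foldl (fun dct n => dct.insert (pvKey data.length n) (pvValFn data n)) PySem.Dict.empty with hDdef
  have hDitems : D.items = [] ++ L.map (fun a => (pvKey data.length a, pvValFn data a)) := hitems
  have hkeys : D.keys = L.map (fun n => pvKey data.length n) := by
    rw [PySem.Dict.keys, hDitems]
    simp [List.map_map]
  have hkeysnodup : D.keys.Nodup := by rw [hkeys]; exact hnodup
  have hgetD : ∀ n ∈ L, D.getD (pvKey data.length n) [] = pvValFn data n := by
    intro n hn
    have hmemit : (pvKey data.length n, pvValFn data n) ∈ D.items := by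
      rw [hDitems]
      simp only [List.nil_append]
      exact List.mem_map.2 ⟨n, hn, rfl⟩
    exact PySem.Dict.getD_of_mem_items D hmemit hkeysnodup []
  rw [hkeys, List.map_map, hLdef, List.map_map, pvCanon]
  apply List.map_congr_left
  intro k hk
  have hkk : k < 2 ^ data.length - 1 := List.mem_range.1 hk
  have hmemL : Int.ofNat (1 + k) ∈ L := by
    rw [hLdef]; exact List.mem_map.2 ⟨k, hk, rfl⟩
  have htn : (Int.ofNat (1 + k)).toNat = 1 + k := by
    rw [Int.ofNat_eq_natCast]; omega
  have hlt : (Int.ofNat (1 + k)).toNat < 2 ^ data.length := by omega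
  simp only [Function.comp_apply]
  rw [hgetD _ hmemL, valueA_eq_filter' data _ (pvKey_len _ _ hlt)]
  have hcp : ((PySem.Set.ofList data.flatten).countP
      (fun x => pvBits (data.map (fun d => PySem.Set.ofList d)) x == pvKey data.length (Int.ofNat (1 + k))))
      = ((PySem.Set.ofList data.flatten).countP (fun x => pvMaskI data x == ((1 + k : Nat) : Int))) := by
    apply List.countP_congr
    intro x _
    rw [Bool.eq_iff_iff, beq_iff_eq, beq_iff_eq,
      bits_eq_key_iff_mask data x _ (by rw [Int.ofNat_eq_natCast]; exact Int.natCast_nonneg _) hlt]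
    rw [show (Int.ofNat (1 + k)) = ((1 + k : Nat) : Int) from rfl]
    simp
  congr 1
  rw [PySem.Set.len, ← List.countP_eq_length_filter, hcp]

-- ===== VERDICT (by name: the statement is the Claim_ definition above) =====
theorem get_venn_labels_spec : Claim_equal_get_venn_labels := by
  intro data fill _
  unfold Spec_get_venn_labels
  rw [A_out, B_out]
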